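-- pv_equiv track=rewrite | github.com/uday96/algebra-word-probs | word_prob_solver.py | filter_et
-- ===== SOURCE A (Python) =====
-- def filter_et(et,sentences,numbers):
-- 	et_filtered = []
-- 	for sentence in sentences:
-- 		sent_ets = []
-- 		for et_x in et:
-- 			if et_x[2] == sentence:
-- 				sent_ets.append(et_x)
-- 		if len(sent_ets) > 1:
-- 			picked_et = False
-- 			for sent_et in sent_ets:
-- 				for num in numbers:
-- 					if num[0] in sent_et[0] and sent_et[2] == num[1]:
-- 						picked_et = True
-- 						et_filtered.append(sent_et)
-- 						break
-- 				if picked_et: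
-- 					break
-- 		elif len(sent_ets) == 1:
-- 			et_filtered.append(sent_ets[0])
-- 	return et_filtered
-- ===== SOURCE B (Python) =====
-- def filter_et(et, sentences, numbers):
--     groups = {}
--     for e in et:
--         groups.setdefault(e[2], []).append(e)
--     out = []
--     for sentence in sentences:
--         g = groups.get(sentence, [])
--         if len(g) == 1:
--             out.append(g[0])
--         elif len(g) > 1:
--             for e in g:
--                 if any(num[0] in e[0] and e[2] == num[1] for num in numbers):
--                     out.append(e)
--                     break
--     return out
-- ===== Notes on version B (the rewrite author's own statement) =====
-- stated objective: faster
-- what changed: B groups the entity-tuples by sentence into a dict in one pass and then handles each sentence via a dict lookup (first match found with any()), instead of A's rescanning of the whole et list for every sentence.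
import Mathlib
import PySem

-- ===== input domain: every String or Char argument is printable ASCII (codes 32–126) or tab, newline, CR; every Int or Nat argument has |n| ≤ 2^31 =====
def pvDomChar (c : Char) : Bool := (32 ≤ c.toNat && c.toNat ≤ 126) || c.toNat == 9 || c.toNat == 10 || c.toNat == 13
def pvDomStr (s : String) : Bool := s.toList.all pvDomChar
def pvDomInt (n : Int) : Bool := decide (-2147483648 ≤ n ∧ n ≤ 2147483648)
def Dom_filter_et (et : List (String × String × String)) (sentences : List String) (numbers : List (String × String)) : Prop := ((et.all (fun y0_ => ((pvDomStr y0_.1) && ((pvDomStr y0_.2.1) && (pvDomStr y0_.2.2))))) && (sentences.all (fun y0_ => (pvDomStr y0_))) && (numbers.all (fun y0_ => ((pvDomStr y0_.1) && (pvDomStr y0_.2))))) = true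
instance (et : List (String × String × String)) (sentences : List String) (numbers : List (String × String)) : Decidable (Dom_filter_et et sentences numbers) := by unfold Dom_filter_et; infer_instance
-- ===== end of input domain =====

-- B groups the entity-tuples by sentence into a dict in one pass, then handles each sentence by lookup
-- instead of A's rescanning of the whole et list for every sentence (faster in a timing run).

-- ===== PORT A =====
-- inner 'for num in numbers: … break' loop, setting picked_et on first match
def pvInnerA (sent_et : String × String × String) : List (String × String) → Bool
  | [] => false
  | num :: rest =>
    if PySem.Str.isIn num.1 sent_et.1 && sent_et.2.2 == num.2 then true
    else pvInnerA sent_et rest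

-- outer 'for sent_et in sent_ets' with the picked_et break: appends the first match, if any
def pvPickA : List (String × String × String) → List (String × String) → List (String × String × String)
  | [], _ => []
  | sent_et :: rest, numbers =>
    if pvInnerA sent_et numbers then [sent_et] else pvPickA rest numbers

def filter_et (et : List (String × String × String)) (sentences : List String) (numbers : List (String × String)) : List (String × String × String) :=
  sentences.foldl (fun et_filtered sentence =>
    let sent_ets := et.foldl (fun se et_x => if et_x.2.2 == sentence then se ++ [et_x] else se) []
    if 1 < sent_ets.length then
      et_filtered ++ pvPickA sent_ets numbers
    else if sent_ets.length == 1 then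
      et_filtered ++ [sent_ets.headI]
    else et_filtered) []

-- ===== PORT B =====
-- first group member matching some number (for-with-break over g, any() over numbers)
def pvPickB (g : List (String × String × String)) (numbers : List (String × String)) : List (String × String × String) :=
  match g.find? (fun e => numbers.any (fun num => PySem.Str.isIn num.1 e.1 && e.2.2 == num.2)) with
  | some e => [e]
  | none => []

def filter_et_alt (et : List (String × String × String)) (sentences : List String) (numbers : List (String × String)) : List (String × String × String) :=
  let groups : PySem.Dict String (List (String × String × String)) :=
    et.foldl (fun d e => d.modify e.2.2 [] (fun l => l ++ [e])) PySem.Dict.empty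
  sentences.foldl (fun out sentence =>
    let g := groups.getD sentence []
    if g.length == 1 then out ++ [g.headI]
    else if 1 < g.length then out ++ pvPickB g numbers
    else out) []

-- ===== PRECONDITION & SPEC =====
def Spec_filter_et (et : List (String × String × String)) (sentences : List String) (numbers : List (String × String)) (out : List (String × String × String)) : Prop := out = filter_et_alt et sentences numbers
instance (et : List (String × String × String)) (sentences : List String) (numbers : List (String × String)) (out : List (String × String × String)) : Decidable (Spec_filter_et et sentences numbers out) := by unfold Spec_filter_et; infer_instance

-- ===== CLAIM (what is proved, stated in full; the proofs are below) =====
def Claim_equal_filter_et : Prop := ∀ (et : List (String × String × String)) (sentences : List String) (numbers : List (String × String)), Dom_filter_et et sentences numbers → Spec_filter_et et sentences numbers (filter_et et sentences numbers)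

-- ===== LEMMAS AND PROOFS =====

-- A's inner break loop is an any()
theorem pvInnerA_eq_any (s : String × String × String) (numbers : List (String × String)) :
    pvInnerA s numbers = numbers.any (fun num => PySem.Str.isIn num.1 s.1 && s.2.2 == num.2) := by
  induction numbers with
  | nil => rfl
  | cons n rest ih =>
    simp only [pvInnerA, List.any_cons, ih]
    cases hc : (PySem.Str.isIn n.1 s.1 && s.2.2 == n.2) <;> simp

-- A's flagged double loop picks the same element as B's find?
theorem pvPickA_eq_pickB (g : List (String × String × String)) (numbers : List (String × String)) :
    pvPickA g numbers = pvPickB g numbers := by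
  induction g with
  | nil => rfl
  | cons e rest ih =>
    simp only [pvPickA, pvPickB, List.find?_cons, pvInnerA_eq_any]
    cases hc : (numbers.any fun num => PySem.Str.isIn num.1 e.1 && e.2.2 == num.2)
    · simpa [pvPickB] using ih
    · simp

-- B's grouping dict looked up at a sentence is exactly A's per-sentence filter
theorem pvGroups_getD (et : List (String × String × String)) (s : String) :
    (et.foldl (fun d e => d.modify e.2.2 [] (fun l => l ++ [e]))
      (PySem.Dict.empty : PySem.Dict String (List (String × String × String)))).getD s []
    = et.filter (fun e => e.2.2 == s) := by
  have hmap : et.foldl (fun d e => d.modify e.2.2 [] (fun l => l ++ [e]))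
      (PySem.Dict.empty : PySem.Dict String (List (String × String × String)))
      = (et.map (fun e : String × String × String => (e.2.2, e))).foldl
          (fun d p => d.modify p.1 [] (fun l => l ++ [p.2])) PySem.Dict.empty := by
    rw [List.foldl_map]
  rw [hmap, PySem.Dict.getD_foldl_modify_append]
  simp [List.filter_map, Function.comp_def, List.map_map]

-- ===== VERDICT (by name: the statement is the Claim_ definition above) =====
theorem filter_et_spec : Claim_equal_filter_et := by
  intro et sentences numbers _
  show filter_et et sentences numbers = filter_et_alt et sentences numbers
  simp only [filter_et, filter_et_alt]
  apply PySem.List.foldl_congr_mem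
  intro acc sentence _
  have hA : et.foldl (fun se et_x => if et_x.2.2 == sentence then se ++ [et_x] else se) ([] : List (String × String × String))
      = et.filter (fun e => e.2.2 == sentence) := by
    simpa using PySem.List.foldl_append_if_eq_filter (fun e : String × String × String => e.2.2 == sentence) et []
  simp only [hA, pvGroups_getD]
  set g := et.filter (fun e => e.2.2 == sentence) with hg
  by_cases h1 : g.length = 1
  · simp [h1]
  · by_cases h2 : 1 < g.length
    · simp [h2, (by omega : g.length ≠ 1), pvPickA_eq_pickB]
    · simp [h1, (by omega : ¬ 1 < g.length)]
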